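-- pv_equiv track=rewrite | github.com/Chavez0296/python | unitThreesessionOne.py | rearrange_guests
-- ===== SOURCE A (Python) =====
-- def rearrange_guests(guests):
--   pos = []
--   neg = []
--
--   for num in guests:
--     if num > 0:
--       pos.append(num)
--     else:
--       neg.append(num)
--
--   filtered_guests = []
--   i = 0
--   j = 0
--   while i < len(pos) or j < len(neg):
--     if i < len(pos):
--       filtered_guests.append(pos[i])
--       i+= 1
--     if j < len(neg):
--       filtered_guests.append(neg[j])
--       j += 1
--
--   return filtered_guests
--   pass
-- ===== SOURCE B (Python) =====
-- def rearrange_guests(guests):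
--   # Single pass assigns each guest a global rank key (2*k for the k-th positive,
--   # 2*k+1 for the k-th non-positive); sorting by that key yields the interleave.
--   counts = [0, 0]
--   keyed = []
--   for num in guests:
--     cls = 0 if num > 0 else 1
--     keyed.append((2 * counts[cls] + cls, num))
--     counts[cls] += 1
--   keyed.sort(key=lambda t: t[0])
--   return [num for _, num in keyed]
-- ===== Notes on version B (the rewrite author's own statement) =====
-- stated objective: alternative
-- what changed: Replaces the two-list partition plus index-counter merge with a single pass that tags each guest with a global rank key (2k for the k-th positive, 2k+1 for the k-th non-positive) followed by one sort on that key.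
import Mathlib
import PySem

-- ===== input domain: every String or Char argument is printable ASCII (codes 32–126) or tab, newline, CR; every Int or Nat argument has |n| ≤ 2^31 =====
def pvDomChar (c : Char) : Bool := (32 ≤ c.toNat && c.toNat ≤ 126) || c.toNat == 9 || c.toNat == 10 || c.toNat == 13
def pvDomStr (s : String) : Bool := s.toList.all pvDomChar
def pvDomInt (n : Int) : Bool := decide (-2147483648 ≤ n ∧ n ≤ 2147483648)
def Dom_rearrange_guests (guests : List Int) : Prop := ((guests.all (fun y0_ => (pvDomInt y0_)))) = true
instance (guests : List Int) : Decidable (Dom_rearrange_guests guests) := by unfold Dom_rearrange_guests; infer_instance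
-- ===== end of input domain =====

-- B replaces A's partition-then-merge (two lists, two index counters) with a single pass that
-- tags each guest with a global rank key (2k / 2k+1) and one sort on that key; alternative, same result.

-- ===== PORT A =====
-- A's while loop: each iteration appends pos[i] if i < len pos, then neg[j] if j < len neg.
def interleaveA : List Int → List Int → List Int
  | [], [] => []
  | p :: ps, [] => p :: interleaveA ps []
  | [], n :: ns => n :: interleaveA [] ns
  | p :: ps, n :: ns => p :: n :: interleaveA ps ns

def rearrange_guests (guests : List Int) : List Int :=
  let pn := guests.foldl
    (fun (pn : List Int × List Int) num =>
      if num > 0 then (pn.1 ++ [num], pn.2) else (pn.1, pn.2 ++ [num]))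
    ([], [])
  interleaveA pn.1 pn.2

-- ===== PORT B =====
-- B's single pass: counts = (c0, c1); each guest appends (2*count[cls] + cls, num); then sort by key.
def rearrange_guests_alt (guests : List Int) : List Int :=
  let st := guests.foldl
    (fun (st : (Int × Int) × List (Int × Int)) num =>
      if num > 0 then ((st.1.1 + 1, st.1.2), st.2 ++ [(2 * st.1.1, num)])
      else ((st.1.1, st.1.2 + 1), st.2 ++ [(2 * st.1.2 + 1, num)]))
    ((0, 0), [])
  (PySem.List.sorted st.2 (fun t => t.1) false).map (fun t => t.2)

-- ===== PRECONDITION & SPEC =====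
def Spec_rearrange_guests (guests : List Int) (out : List Int) : Prop := out = rearrange_guests_alt guests
instance (guests : List Int) (out : List Int) : Decidable (Spec_rearrange_guests guests out) := by unfold Spec_rearrange_guests; infer_instance

-- ===== CLAIM (what is proved, stated in full; the proofs are below) =====
def Claim_equal_rearrange_guests : Prop := ∀ (guests : List Int), Dom_rearrange_guests guests → Spec_rearrange_guests guests (rearrange_guests guests)

-- ===== LEMMAS AND PROOFS =====

-- keys of positives starting at rank a: 2a, 2(a+1), …
def annotP : Int → List Int → List (Int × Int)
  | _, [] => []
  | a, p :: ps => (2 * a, p) :: annotP (a + 1) ps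

-- keys of non-positives starting at rank b: 2b+1, 2(b+1)+1, …
def annotN : Int → List Int → List (Int × Int)
  | _, [] => []
  | b, n :: ns => (2 * b + 1, n) :: annotN (b + 1) ns

-- the interleave, annotated with the keys B assigns
def tgt : Int → Int → List Int → List Int → List (Int × Int)
  | _, _, [], [] => []
  | a, b, p :: ps, [] => (2 * a, p) :: tgt (a + 1) b ps []
  | a, b, [], n :: ns => (2 * b + 1, n) :: tgt a (b + 1) [] ns
  | a, b, p :: ps, n :: ns => (2 * a, p) :: (2 * b + 1, n) :: tgt (a + 1) (b + 1) ps ns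

-- B's keyed list, as a recursion on the input
def keyedGo : Int → Int → List Int → List (Int × Int)
  | _, _, [] => []
  | a, b, x :: xs => if x > 0 then (2 * a, x) :: keyedGo (a + 1) b xs
                     else (2 * b + 1, x) :: keyedGo a (b + 1) xs

theorem rg_foldl_partition (l : List Int) (acc1 acc2 : List Int) :
    l.foldl
      (fun (pn : List Int × List Int) num =>
        if num > 0 then (pn.1 ++ [num], pn.2) else (pn.1, pn.2 ++ [num]))
      (acc1, acc2)
    = (acc1 ++ l.filter (fun num => num > 0), acc2 ++ l.filter (fun num => !(num > 0))) := by
  induction l generalizing acc1 acc2 with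
  | nil => simp
  | cons x xs ih =>
    by_cases h : x > 0 <;> simp [List.foldl, h, ih]

theorem b_foldl (l : List Int) (a b : Int) (acc : List (Int × Int)) :
    (l.foldl
      (fun (st : (Int × Int) × List (Int × Int)) num =>
        if num > 0 then ((st.1.1 + 1, st.1.2), st.2 ++ [(2 * st.1.1, num)])
        else ((st.1.1, st.1.2 + 1), st.2 ++ [(2 * st.1.2 + 1, num)]))
      ((a, b), acc)).2 = acc ++ keyedGo a b l := by
  induction l generalizing a b acc with
  | nil => simp [keyedGo]
  | cons x xs ih =>
    by_cases h : x > 0 <;> simp [List.foldl, h, keyedGo, ih]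

theorem mem_annotP {x : Int × Int} (a : Int) (ps : List Int) (h : x ∈ annotP a ps) :
    2 * a ≤ x.1 := by
  induction ps generalizing a with
  | nil => simp [annotP] at h
  | cons p ps ih =>
    rcases List.mem_cons.mp h with rfl | h
    · simp
    · have := ih (a + 1) h; omega

theorem mem_annotN {x : Int × Int} (b : Int) (ns : List Int) (h : x ∈ annotN b ns) :
    2 * b + 1 ≤ x.1 := by
  induction ns generalizing b with
  | nil => simp [annotN] at h
  | cons n ns ih =>
    rcases List.mem_cons.mp h with rfl | h
    · simp
    · have := ih (b + 1) h; omega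

theorem annotP_pairwise (a : Int) (ps : List Int) :
    (annotP a ps).Pairwise (fun u v => u.1 < v.1) := by
  induction ps generalizing a with
  | nil => simp [annotP]
  | cons p ps ih =>
    refine List.Pairwise.cons ?_ (ih (a + 1))
    intro y hy
    have := mem_annotP (a + 1) ps hy
    simp; omega

theorem annotN_pairwise (b : Int) (ns : List Int) :
    (annotN b ns).Pairwise (fun u v => u.1 < v.1) := by
  induction ns generalizing b with
  | nil => simp [annotN]
  | cons n ns ih =>
    refine List.Pairwise.cons ?_ (ih (b + 1))
    intro y hy
    have := mem_annotN (b + 1) ns hy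
    simp; omega

theorem tgt_pos_nil (a b : Int) (ps : List Int) : tgt a b ps [] = annotP a ps := by
  induction ps generalizing a b with
  | nil => simp [tgt, annotP]
  | cons p ps ih => simp [tgt, annotP, ih]

theorem tgt_nil_neg (a b : Int) (ns : List Int) : tgt a b [] ns = annotN b ns := by
  induction ns generalizing a b with
  | nil => simp [tgt, annotN]
  | cons n ns ih => simp [tgt, annotN, ih]

theorem tgt_mem_diag {x : Int × Int} (a : Int) (ps ns : List Int)
    (h : x ∈ tgt a a ps ns) : 2 * a ≤ x.1 := by
  induction ps generalizing ns a with
  | nil =>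
    rw [tgt_nil_neg] at h
    have := mem_annotN a ns h; omega
  | cons p ps ih =>
    cases ns with
    | nil =>
      rw [tgt_pos_nil] at h
      exact mem_annotP a (p :: ps) h
    | cons n ns =>
      simp only [tgt] at h
      rcases List.mem_cons.mp h with rfl | h
      · simp
      rcases List.mem_cons.mp h with rfl | h
      · simp
      · have := ih (a + 1) ns h; omega

theorem tgt_pairwise_diag (a : Int) (ps ns : List Int) :
    (tgt a a ps ns).Pairwise (fun u v => u.1 < v.1) := by
  induction ps generalizing ns a with
  | nil => rw [tgt_nil_neg]; exact annotN_pairwise a ns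
  | cons p ps ih =>
    cases ns with
    | nil => rw [tgt_pos_nil]; exact annotP_pairwise a (p :: ps)
    | cons n ns =>
      simp only [tgt]
      refine List.Pairwise.cons ?_ (List.Pairwise.cons ?_ (ih (a + 1) ns))
      · intro y hy
        rcases List.mem_cons.mp hy with rfl | hy
        · simp
        · have := tgt_mem_diag (a + 1) ps ns hy; simp; omega
      · intro y hy
        have := tgt_mem_diag (a + 1) ps ns hy; simp; omega

theorem tgt_perm (a b : Int) (ps ns : List Int) :
    (tgt a b ps ns).Perm (annotP a ps ++ annotN b ns) := by
  induction ps generalizing ns a b with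
  | nil => rw [tgt_nil_neg]; simp [annotP]

  | cons p ps ih =>
    cases ns with
    | nil => rw [tgt_pos_nil]; simp [annotN]
    | cons n ns =>
      simp only [tgt, annotP, annotN]
      exact List.Perm.cons _ ((List.Perm.cons _ (ih (a + 1) (b + 1) ns)).trans
        List.perm_middle.symm)

theorem keyedGo_perm (a b : Int) (l : List Int) :
    (keyedGo a b l).Perm
      (annotP a (l.filter (fun num => num > 0)) ++ annotN b (l.filter (fun num => !(num > 0)))) := by
  induction l generalizing a b with
  | nil => simp [keyedGo, annotP, annotN]
  | cons x xs ih =>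
    by_cases h : x > 0
    · simpa [keyedGo, h, annotP] using List.Perm.cons ((2 * a : Int), x) (ih (a + 1) b)
    · simpa [keyedGo, h, annotN] using
        (List.Perm.cons ((2 * b + 1 : Int), x) (ih a (b + 1))).trans List.perm_middle.symm

theorem tgt_map_snd (a b : Int) (ps ns : List Int) :
    (tgt a b ps ns).map (fun t => t.2) = interleaveA ps ns := by
  induction ps generalizing ns a b with
  | nil =>
    induction ns generalizing b with
    | nil => simp [tgt, interleaveA]
    | cons n ns ihn => simp [tgt, interleaveA, ihn]
  | cons p ps ih =>
    cases ns with
    | nil => simp [tgt, interleaveA, ih]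
    | cons n ns => simp [tgt, interleaveA, ih]

-- ===== VERDICT (by name: the statement is the Claim_ definition above) =====
theorem rearrange_guests_spec : Claim_equal_rearrange_guests := by
  intro guests _
  unfold Spec_rearrange_guests rearrange_guests rearrange_guests_alt
  simp only [rg_foldl_partition, b_foldl, List.nil_append]
  have h : PySem.List.sorted (keyedGo 0 0 guests) (fun t => t.1)
      = tgt 0 0 (guests.filter (fun num => num > 0)) (guests.filter (fun num => !(num > 0))) :=
    PySem.List.sorted_eq_of_perm_of_pairwise_lt _ _ _
      ((tgt_perm 0 0 _ _).trans (keyedGo_perm 0 0 guests).symm)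
      (tgt_pairwise_diag 0 _ _)
  rw [h, tgt_map_snd]
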